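-- pv_equiv track=rewrite | github.com/sdimov2/gymapp | src/flask/backend.py | pareto
-- ===== SOURCE A (Python) =====
-- def pareto(data):
--     x = []
--     y = []
--     z = []
--     for element in data:
--         x.append(element[0])
--         y.append(element[1])
--         z.append(element[0]*element[1])
--
--     output = set(find_maxes(data, 1)).union(find_maxes(data, 0))
--     output = find_maxes(output, 1)
--
--     return output
--
-- def find_maxes(data, respect):
--     # assumes 2d respect is which coordinate of the pair with respect to
--     # set(x, y):
--     # maxes with respect to y would be finding unique values in y
--     # then finding the max values of x for each y
--     # given a rep range, find the largest weight for it
--     maxes = set()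
--     #make the set of the other var unique
--     unique_split_set = set()
--     for element in data:
--         unique_split_set.add(element[respect^1])
--
--     # stopped using below because i discovered sets
--     #unique_split = make_unique(data, respect ^ 1)
--     for unique in unique_split_set:
--         max = 0
--         for element in data:
--             if element[respect ^ 1] == unique:
--                 if element[respect] > max:
--                     max = element[respect]
--         if respect == 0:
--             maxes.add((max, unique))
--         else:
--             maxes.add((unique, max))
--     return maxes
-- ===== SOURCE B (Python) =====
-- def pareto(data):
--     # One pass: group by each coordinate in a dict, tracking the running max (init 0).
--     best_y = {}
--     best_x = {}
--     for x, y in data: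
--         best_y[x] = max(best_y.get(x, 0), y)
--         best_x[y] = max(best_x.get(y, 0), x)
--     cand = set(best_y.items()) | {(x, y) for y, x in best_x.items()}
--     final = {}
--     for x, y in cand:
--         final[x] = max(final.get(x, 0), y)
--     return set(final.items())
-- ===== Notes on version B (the rewrite author's own statement) =====
-- stated objective: faster
-- what changed: A builds the set of keys and then rescans the whole list for every key (and calls this routine three times); B makes one pass per stage with dicts that track the running max (init 0) per key, so the inner rescans disappear.
import Mathlib
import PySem

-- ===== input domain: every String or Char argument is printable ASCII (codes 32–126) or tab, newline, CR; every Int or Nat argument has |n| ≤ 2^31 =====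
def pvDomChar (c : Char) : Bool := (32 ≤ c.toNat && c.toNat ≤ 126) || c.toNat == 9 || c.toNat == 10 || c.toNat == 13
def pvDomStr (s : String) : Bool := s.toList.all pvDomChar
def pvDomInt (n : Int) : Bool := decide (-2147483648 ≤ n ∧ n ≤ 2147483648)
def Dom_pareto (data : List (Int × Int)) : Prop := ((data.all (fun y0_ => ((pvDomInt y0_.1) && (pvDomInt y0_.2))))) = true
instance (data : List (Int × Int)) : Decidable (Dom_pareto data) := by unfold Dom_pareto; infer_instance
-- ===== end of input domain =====

-- B replaces A's quadratic per-key rescans with one-pass dict grouping (running max, init 0);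
-- both Pythons return a SET — the ports agree as lists because both traverse keys in first-occurrence order.

-- ===== PORT A =====
-- Python's 'i ^ 1' (int xor); exact for the nonnegative operands A uses (respect ∈ {0,1})
def intXor (a b : Int) : Int := Int.ofNat (a.toNat ^^^ b.toNat)

-- element[i] on a pair, i ∈ {0,1} (exact for the indices A uses)
def pairGet (p : Int × Int) (i : Int) : Int := if i = 0 then p.1 else p.2

def find_maxes (data : List (Int × Int)) (respect : Int) : List (Int × Int) :=
  let unique_split_set : PySem.Set Int :=
    data.foldl (fun s e => PySem.Set.add s (pairGet e (intXor respect 1))) PySem.Set.empty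
  unique_split_set.foldl
    (fun maxes u =>
      let mx := data.foldl
        (fun m e =>
          if pairGet e (intXor respect 1) = u then
            if pairGet e respect > m then pairGet e respect else m
          else m) 0
      PySem.Set.add maxes (if respect = 0 then (mx, u) else (u, mx)))
    PySem.Set.empty

def pareto (data : List (Int × Int)) : List (Int × Int) :=
  let _xyz := data.foldl
    (fun (s : List Int × List Int × List Int) e =>
      (s.1 ++ [e.1], s.2.1 ++ [e.2], s.2.2 ++ [e.1 * e.2])) ([], [], [])
  let output := PySem.Set.union (PySem.Set.ofList (find_maxes data 1)) (find_maxes data 0)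
  find_maxes output 1

-- ===== PORT B =====
def pareto_alt (data : List (Int × Int)) : List (Int × Int) :=
  let bests := data.foldl
    (fun (bd : PySem.Dict Int Int × PySem.Dict Int Int) e =>
      (bd.1.modify e.1 0 (fun m => max m e.2), bd.2.modify e.2 0 (fun m => max m e.1)))
    (PySem.Dict.empty, PySem.Dict.empty)
  let cand := PySem.Set.union (PySem.Set.ofList bests.1.items)
    (bests.2.items.map (fun p => (p.2, p.1)))
  let final := cand.foldl (fun d p => d.modify p.1 0 (fun m => max m p.2)) PySem.Dict.empty
  PySem.Set.ofList final.items

-- ===== PRECONDITION & SPEC =====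
def Spec_pareto (data : List (Int × Int)) (out : List (Int × Int)) : Prop := out = pareto_alt data
instance (data : List (Int × Int)) (out : List (Int × Int)) : Decidable (Spec_pareto data out) := by unfold Spec_pareto; infer_instance

-- ===== CLAIM (what is proved, stated in full; the proofs are below) =====
def Claim_equal_pareto : Prop := ∀ (data : List (Int × Int)), Dom_pareto data → Spec_pareto data (pareto data)

-- ===== LEMMAS AND PROOFS =====

-- the one-pass grouping dict: for each key (first-occurrence order) the running max (init 0) of the values
def groupMax (key val : Int × Int → Int) (l : List (Int × Int)) : PySem.Dict Int Int :=
  l.foldl (fun d p => d.modify (key p) 0 (fun m => max m (val p))) PySem.Dict.empty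

theorem getD_groupMax_fold (key val : Int × Int → Int) (l : List (Int × Int))
    (d : PySem.Dict Int Int) (k : Int) :
    (l.foldl (fun d p => d.modify (key p) 0 (fun m => max m (val p))) d).getD k 0
      = l.foldl (fun m p => if key p = k then max m (val p) else m) (d.getD k 0) := by
  induction l generalizing d with
  | nil => rfl
  | cons a t ih =>
    simp only [List.foldl_cons, ih, PySem.Dict.getD_modify]
    by_cases h : key a = k
    · simp [h]
    · simp [h, Ne.symm h]

theorem items_groupMax (key val : Int × Int → Int) (l : List (Int × Int)) :
    (groupMax key val l).items
      = (PySem.Set.ofList (l.map key)).map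
          (fun k => (k, l.foldl (fun m p => if key p = k then max m (val p) else m) 0)) := by
  have hnd : (groupMax key val l).keys.Nodup := by
    exact PySem.Dict.nodup_keys_foldl_modify_key l key 0 _ _ PySem.Dict.nodup_keys_empty
  have hk : (groupMax key val l).keys = PySem.Set.ofList (l.map key) := by
    unfold groupMax
    rw [PySem.Dict.keys_foldl_modify_key]
    rfl
  rw [PySem.Dict.items_eq_map_keys _ hnd 0, hk]
  apply List.map_congr_left
  intro k _
  have := getD_groupMax_fold key val l PySem.Dict.empty k
  simp [groupMax, this, PySem.Dict.getD_empty]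

theorem set_foldl_add_append {α : Type} [BEq α] [LawfulBEq α] (l : List α) :
    ∀ (s : List α), (∀ x ∈ l, x ∉ s) → l.Nodup →
      l.foldl PySem.Set.add s = s ++ l := by
  induction l with
  | nil => intro s _ _; simp
  | cons a t ih =>
    intro s hdisj hnd
    have hmem : a ∉ s := fun h => hdisj a (by simp) h
    have ha : PySem.Set.add s a = s ++ [a] := by
      simp [PySem.Set.add, PySem.Set.contains]
      exact hmem
    simp only [List.foldl_cons, ha]
    rw [ih (s ++ [a])]
    · simp
    · intro x hx
      simp only [List.mem_append, List.mem_singleton]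
      rintro (h | rfl)
      · exact hdisj x (by simp [hx]) h
      · exact (List.nodup_cons.mp hnd).1 hx
    · exact (List.nodup_cons.mp hnd).2

theorem ofList_eq_self_of_nodup {α : Type} [BEq α] [LawfulBEq α] (l : List α) (h : l.Nodup) :
    PySem.Set.ofList l = l := by
  rw [PySem.Set.ofList_eq_foldl]
  simpa using set_foldl_add_append l [] (by simp) h

theorem foldl_set_add_map (U : List Int) (f : Int → Int × Int) (h : (U.map f).Nodup) :
    U.foldl (fun s u => PySem.Set.add s (f u)) ([] : PySem.Set (Int × Int)) = U.map f := by
  rw [← PySem.Set.update_map_eq_foldl_add, PySem.Set.update_nil_left]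
  exact ofList_eq_self_of_nodup _ h

-- the inner rescan of A computes a running max
theorem inner_max_eq (l : List (Int × Int)) (key val : Int × Int → Int) (u : Int) :
    l.foldl (fun m e => if key e = u then if val e > m then val e else m else m) 0
      = l.foldl (fun m p => if key p = u then max m (val p) else m) 0 := by
  apply PySem.List.foldl_congr_mem
  intro m x _
  split_ifs <;> omega

theorem find_maxes_one (l : List (Int × Int)) :
    find_maxes l 1 = (groupMax Prod.fst Prod.snd l).items := by
  have hx : intXor 1 1 = 0 := by decide
  have hU : l.foldl (fun s e => PySem.Set.add s (pairGet e (intXor 1 1))) PySem.Set.empty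
      = PySem.Set.ofList (l.map Prod.fst) := by
    rw [show (fun s (e : Int × Int) => PySem.Set.add s (pairGet e (intXor 1 1)))
        = (fun s (e : Int × Int) => PySem.Set.add s e.1) from by funext s e; simp [pairGet, hx]]
    rw [← PySem.Set.update_map_eq_foldl_add, PySem.Set.update_empty]
  have hUnd : (PySem.Set.ofList (l.map Prod.fst)).Nodup := PySem.Set.nodup_ofList _
  have hg : ((PySem.Set.ofList (l.map Prod.fst)).map
      (fun k => (k, l.foldl (fun m p => if p.1 = k then max m p.2 else m) 0))).Nodup := by
    refine List.Nodup.map_on ?_ hUnd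
    intro a _ b _ hab
    simpa using congrArg Prod.fst hab
  unfold find_maxes
  simp only [hU, items_groupMax]
  rw [← foldl_set_add_map _ _ hg]
  apply PySem.List.foldl_congr_mem
  intro maxes u _
  simp only [hx, pairGet]
  norm_num
  rw [inner_max_eq l Prod.fst Prod.snd u]

theorem find_maxes_zero (l : List (Int × Int)) :
    find_maxes l 0 = (groupMax Prod.snd Prod.fst l).items.map (fun p => (p.2, p.1)) := by
  have hx : intXor 0 1 = 1 := by decide
  have hU : l.foldl (fun s e => PySem.Set.add s (pairGet e (intXor 0 1))) PySem.Set.empty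
      = PySem.Set.ofList (l.map Prod.snd) := by
    rw [show (fun s (e : Int × Int) => PySem.Set.add s (pairGet e (intXor 0 1)))
        = (fun s (e : Int × Int) => PySem.Set.add s e.2) from by funext s e; simp [pairGet, hx]]
    rw [← PySem.Set.update_map_eq_foldl_add, PySem.Set.update_empty]
  have hUnd : (PySem.Set.ofList (l.map Prod.snd)).Nodup := PySem.Set.nodup_ofList _
  have hg : ((PySem.Set.ofList (l.map Prod.snd)).map
      ((fun p : Int × Int => (p.2, p.1)) ∘
        fun k => (k, l.foldl (fun m p => if p.2 = k then max m p.1 else m) 0))).Nodup := by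
    refine List.Nodup.map_on ?_ hUnd
    intro a _ b _ hab
    simpa [Function.comp] using congrArg Prod.snd hab
  unfold find_maxes
  simp only [hU, items_groupMax, List.map_map]
  rw [← foldl_set_add_map _ _ hg]
  apply PySem.List.foldl_congr_mem
  intro maxes u _
  simp only [hx, pairGet, Function.comp]
  norm_num
  rw [inner_max_eq l Prod.snd Prod.fst u]

theorem nodup_items_groupMax (key val : Int × Int → Int) (l : List (Int × Int)) :
    (groupMax key val l).items.Nodup := by
  have hnd : (groupMax key val l).keys.Nodup :=
    PySem.Dict.nodup_keys_foldl_modify_key l key 0 _ _ PySem.Dict.nodup_keys_empty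
  exact hnd.of_map

-- ===== VERDICT (by name: the statement is the Claim_ definition above) =====
theorem pareto_spec : Claim_equal_pareto := by
  intro data _
  show pareto data = pareto_alt data
  unfold pareto pareto_alt
  rw [PySem.List.foldl_prod_mk
      (f := fun d (e : Int × Int) => PySem.Dict.modify d e.1 0 (fun m => max m e.2))
      (g := fun d (e : Int × Int) => PySem.Dict.modify d e.2 0 (fun m => max m e.1))]
  show find_maxes
      (PySem.Set.union (PySem.Set.ofList (find_maxes data 1)) (find_maxes data 0)) 1
    = PySem.Set.ofList (groupMax Prod.fst Prod.snd
        (PySem.Set.union (PySem.Set.ofList ((groupMax Prod.fst Prod.snd data).items))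
          ((groupMax Prod.snd Prod.fst data).items.map (fun p => (p.2, p.1))))).items
  rw [find_maxes_one data, find_maxes_zero data]
  rw [find_maxes_one]
  exact (ofList_eq_self_of_nodup _ (nodup_items_groupMax Prod.fst Prod.snd _)).symm
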